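-- pv_equiv track=rewrite | github.com/cbouilla/pcg | Python/Version Matrice Génératrice/fonctions.py | FactorisationLUMod
-- ===== SOURCE A (Python) =====
-- def euclide(a, b):
--     x,y, u,v = 0,1, 1,0
--     while a != 0:
--         q,r = b//a,b%a; m,n = x-u*q,y-v*q # use x//y for floor "floor division"
--         b,a, x,y, u,v = a,r, u,v, m,n
--     return b, x, y
--
-- def modinv(a, mod): #mod premier
--     g, x, y = euclide(a, mod)
--     return x % mod
--
-- def FactorisationLUMod(M,mod): #mod premier
--     n=len(M)
--     L=[[0 for i in range(n)]for i in range(n)]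
--     U=[[M[i][j] % mod for j in range(n)]for i in range(n)]
--     for i in range(n):
--         L[i][i]=1
--         inv=modinv(U[i][i],mod)
--         for j in range(i+1,n):
--             L[j][i]=(U[j][i] * inv) % mod
--             for k in range(n):
--                 U[j][k]=(U[j][k] - L[j][i] * U[i][k]) % mod
--     return L,U
-- ===== SOURCE B (Python) =====
-- def euclide(a, b):
--     x, y, u, v = 0, 1, 1, 0
--     while a != 0:
--         q, r = b // a, b % a
--         m, n = x - u * q, y - v * q
--         b, a, x, y, u, v = a, r, u, v, m, n
--     return b, x, y
--
--
-- def modinv(a, mod):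
--     g, x, y = euclide(a, mod)
--     return x % mod
--
--
-- def FactorisationLUMod(M, mod):
--     # Left-looking LU: each row is fully reduced against the already-finalized
--     # pivot rows when its turn comes (deferred updates), instead of A's eager
--     # rank-1 updates of all later rows at each pivot step.
--     n = len(M)
--     Lrows, Urows, invs = [], [], []
--     for i in range(n):
--         row = [M[i][j] % mod for j in range(n)]
--         lrow = [0] * n
--         for s in range(i):
--             f = (row[s] * invs[s]) % mod
--             lrow[s] = f
--             row = [(row[k] - f * Urows[s][k]) % mod for k in range(n)]
--         lrow[i] = 1
--         Lrows.append(lrow)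
--         Urows.append(row)
--         invs.append(modinv(row[i], mod))
--     return Lrows, Urows
-- ===== Notes on version B (the rewrite author's own statement) =====
-- stated objective: alternative
-- what changed: A does right-looking in-place elimination (at each pivot i it eagerly rank-1-updates all later rows of U); B is a left-looking LU that builds L and U row by row, fully reducing each row against the already-finalized pivot rows only when its own turn comes (deferred updates), never mutating a matrix in place.
import Mathlib
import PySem

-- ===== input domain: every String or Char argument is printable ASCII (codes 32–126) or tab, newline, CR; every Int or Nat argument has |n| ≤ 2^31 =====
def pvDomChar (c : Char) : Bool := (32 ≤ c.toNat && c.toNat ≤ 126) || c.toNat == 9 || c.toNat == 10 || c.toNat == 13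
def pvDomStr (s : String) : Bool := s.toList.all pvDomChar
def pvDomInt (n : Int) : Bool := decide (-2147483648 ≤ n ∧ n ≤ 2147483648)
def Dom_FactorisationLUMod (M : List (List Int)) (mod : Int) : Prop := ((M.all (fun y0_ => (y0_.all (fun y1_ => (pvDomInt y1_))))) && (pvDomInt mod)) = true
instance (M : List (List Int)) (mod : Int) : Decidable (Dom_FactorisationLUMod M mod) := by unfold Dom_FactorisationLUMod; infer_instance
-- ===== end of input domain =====

-- B replaces A's right-looking eager rank-1 updates by a left-looking LU: each row is
-- fully reduced against the already-finalized pivot rows when its own turn comes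
-- (deferred updates); same O(n^3) cost, different traversal (objective: alternative).

-- ===== PORT A =====
-- Python indexing M[i][j] is total here via getD; exact on Pre_ (square-enough matrices), where all indices are in range.
def pvMget (A : List (List Int)) (i j : Nat) : Int := (A.getD i []).getD j 0

theorem pvModNatAbsLt (b a : Int) (h : a ≠ 0) : (PySem.Int.mod b a).natAbs < a.natAbs := by
  rcases lt_trichotomy a 0 with ha | ha | ha
  · have h1 := PySem.Int.mod_neg_bounds b ha
    omega
  · exact absurd ha h
  · have h1 := PySem.Int.mod_nonneg b ha
    have h2 := PySem.Int.mod_lt b ha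
    omega

-- while-loop of euclide, state (a, b, x, y, u, v) in Python's shuffle order
def euclideF (a b x y u v : Int) : Int × Int × Int :=
  if ha : a = 0 then (b, x, y)
  else euclideF (PySem.Int.mod b a) a u v
        (x - u * PySem.Int.floordiv b a) (y - v * PySem.Int.floordiv b a)
termination_by a.natAbs
decreasing_by exact pvModNatAbsLt b a ha

def euclide (a b : Int) : Int × Int × Int := euclideF a b 0 1 1 0

def modinv (a mod : Int) : Int := PySem.Int.mod (euclide a mod).2.1 mod

-- k-loop body: U[j][k] = (U[j][k] - L[j][i] * U[i][k]) % mod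
def aInnerK (mod : Int) (i j : Nat) (lji : Int) (U : List (List Int)) (k : Nat) : List (List Int) :=
  U.set j ((U.getD j []).set k (PySem.Int.mod (pvMget U j k - lji * pvMget U i k) mod))

-- j-loop body: L[j][i] = (U[j][i] * inv) % mod, then the k-loop
def aInnerJ (mod : Int) (n i : Nat) (inv : Int) (LU : List (List Int) × List (List Int)) (j : Nat) :
    List (List Int) × List (List Int) :=
  let lji := PySem.Int.mod (pvMget LU.2 j i * inv) mod
  (LU.1.set j ((LU.1.getD j []).set i lji),
   (List.range n).foldl (aInnerK mod i j lji) LU.2)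

-- i-loop body: L[i][i] = 1, inv = modinv(U[i][i], mod), then the j-loop over range(i+1, n)
def aOuter (mod : Int) (n : Nat) (LU : List (List Int) × List (List Int)) (i : Nat) :
    List (List Int) × List (List Int) :=
  let L1 := LU.1.set i ((LU.1.getD i []).set i 1)
  let inv := modinv (pvMget LU.2 i i) mod
  (List.range' (i + 1) (n - (i + 1))).foldl (aInnerJ mod n i inv) (L1, LU.2)

def FactorisationLUMod (M : List (List Int)) (mod : Int) : List (List Int) × List (List Int) :=
  let n := M.length
  let L0 := (List.range n).map (fun _ => (List.range n).map (fun _ => (0 : Int)))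
  let U0 := (List.range n).map (fun i => (List.range n).map (fun j => PySem.Int.mod (pvMget M i j) mod))
  (List.range n).foldl (aOuter mod n) (L0, U0)

-- ===== PORT B =====
-- s-loop body of B: reduce the working row against finalized pivot row s, recording lrow[s]
def bStep (mod : Int) (n : Nat) (Us : List (List Int)) (invs : List Int)
    (rl : List Int × List Int) (s : Nat) : List Int × List Int :=
  let f := PySem.Int.mod (rl.1.getD s 0 * invs.getD s 0) mod
  ((List.range n).map (fun k => PySem.Int.mod (rl.1.getD k 0 - f * (Us.getD s []).getD k 0) mod),
   rl.2.set s f)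

-- i-loop body of B: build row i from M, reduce it against rows 0..i-1, finalize and append
def bOuter (M : List (List Int)) (mod : Int) (n : Nat)
    (st : List (List Int) × List (List Int) × List Int) (i : Nat) :
    List (List Int) × List (List Int) × List Int :=
  let row0 := (List.range n).map (fun j => PySem.Int.mod (pvMget M i j) mod)
  let rl := (List.range i).foldl (bStep mod n st.2.1 st.2.2) (row0, List.replicate n 0)
  (st.1 ++ [rl.2.set i 1], st.2.1 ++ [rl.1], st.2.2 ++ [modinv (rl.1.getD i 0) mod])

def FactorisationLUMod_alt (M : List (List Int)) (mod : Int) : List (List Int) × List (List Int) :=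
  let n := M.length
  let st := (List.range n).foldl (bOuter M mod n) ([], [], [])
  (st.1, st.2.1)

-- ===== PRECONDITION & SPEC =====
-- Pre_ excludes exactly the inputs where Python A raises: a row shorter than len(M)
-- (IndexError) and mod = 0 with a nonempty matrix (ZeroDivisionError in M[i][j] % mod).
def Pre_FactorisationLUMod (M : List (List Int)) (mod : Int) : Prop :=
  (∀ row ∈ M, M.length ≤ row.length) ∧ (M = [] ∨ mod ≠ 0)
instance (M : List (List Int)) (mod : Int) : Decidable (Pre_FactorisationLUMod M mod) := by
  unfold Pre_FactorisationLUMod; infer_instance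

def pvWitness_FactorisationLUMod : List (List Int) × Int := ([[2, 1], [3, 4]], 5)

def Spec_FactorisationLUMod (M : List (List Int)) (mod : Int) (out : List (List Int) × List (List Int)) : Prop := out = FactorisationLUMod_alt M mod
instance (M : List (List Int)) (mod : Int) (out : List (List Int) × List (List Int)) : Decidable (Spec_FactorisationLUMod M mod out) := by unfold Spec_FactorisationLUMod; infer_instance

-- ===== CLAIM (what is proved, stated in full; the proofs are below) =====
def Claim_equal_FactorisationLUMod : Prop := ∀ (M : List (List Int)) (mod : Int), Dom_FactorisationLUMod M mod → Pre_FactorisationLUMod M mod → Spec_FactorisationLUMod M mod (FactorisationLUMod M mod)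

-- ===== LEMMAS AND PROOFS =====

-- getD helpers
theorem pvGetD_set_ne {l : List Int} {i j : Nat} {v : Int} (h : i ≠ j) (d : Int) :
    (l.set i v).getD j d = l.getD j d := by
  simp [List.getD_eq_getElem?_getD, List.getElem?_set_ne h]

theorem pvGetD_set_self' {l : List (List Int)} {i : Nat} {v : List Int} (h : i < l.length) :
    (l.set i v).getD i [] = v := by
  simp [List.getD_eq_getElem?_getD, List.getElem?_set_self h]

theorem pvGetD_set_ne' {l : List (List Int)} {i j : Nat} {v : List Int} (h : i ≠ j) :
    (l.set i v).getD j [] = l.getD j [] := by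
  simp [List.getD_eq_getElem?_getD, List.getElem?_set_ne h]

theorem pvSet_getD_self {l : List (List Int)} {j : Nat} (h : j < l.length) :
    l.set j (l.getD j []) = l := by
  have : l.getD j [] = l[j] := by simp [List.getD_eq_getElem?_getD, List.getElem?_eq_getElem h]
  rw [this, List.set_getElem_self]

theorem pvGetD_snoc_self {α : Type} (xs : List α) (y : α) (d : α) :
    (xs ++ [y]).getD xs.length d = y := by
  rw [List.getD_append_right _ _ _ _ (le_refl _)]
  simp

theorem pvGetD_snoc_at {α : Type} (xs : List α) (y : α) (d : α) {i : Nat} (h : i = xs.length) :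
    (xs ++ [y]).getD i d = y := by subst h; exact pvGetD_snoc_self xs y d

theorem pvGetD_snoc_lt {α : Type} (xs : List α) (y : α) (d : α) {i : Nat} (h : i < xs.length) :
    (xs ++ [y]).getD i d = xs.getD i d := List.getD_append _ _ _ _ h

theorem pvFoldlCongr {α β : Type} (l : List α) (f g : β → α → β) :
    ∀ (b : β), (∀ b a, a ∈ l → f b a = g b a) → l.foldl f b = l.foldl g b := by
  induction l with
  | nil => intro b _; rfl
  | cons x xs ih =>
      intro b h
      simp only [List.foldl_cons]
      rw [h b x (List.mem_cons_self), ih _ (fun b a ha => h b a (List.mem_cons_of_mem _ ha))]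

-- B's partial state after processing rows 0..t-1
def pvBacc (M : List (List Int)) (md : Int) (n t : Nat) :
    List (List Int) × List (List Int) × List Int :=
  (List.range t).foldl (bOuter M md n) ([], [], [])

def pvRow0 (M : List (List Int)) (md : Int) (n i : Nat) : List Int :=
  (List.range n).map (fun j => PySem.Int.mod (pvMget M i j) md)

-- row r after t reduction steps (against pivot rows 0..t-1)
def pvRed (M : List (List Int)) (md : Int) (n t r : Nat) : List Int × List Int :=
  (List.range t).foldl (bStep md n (pvBacc M md n t).2.1 (pvBacc M md n t).2.2)
    (pvRow0 M md n r, List.replicate n 0)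

def pvInvt (M : List (List Int)) (md : Int) (n t : Nat) : Int :=
  modinv ((pvRed M md n t t).1.getD t 0) md

theorem pvBacc_succ (M : List (List Int)) (md : Int) (n t : Nat) :
    pvBacc M md n (t + 1) =
      ((pvBacc M md n t).1 ++ [(pvRed M md n t t).2.set t 1],
       (pvBacc M md n t).2.1 ++ [(pvRed M md n t t).1],
       (pvBacc M md n t).2.2 ++ [modinv ((pvRed M md n t t).1.getD t 0) md]) := by
  show (List.range (t + 1)).foldl (bOuter M md n) ([], [], []) = _
  rw [List.range_succ, List.foldl_append]
  rfl

theorem pvBacc_len (M : List (List Int)) (md : Int) (n : Nat) :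
    ∀ t, (pvBacc M md n t).1.length = t ∧ (pvBacc M md n t).2.1.length = t ∧
         (pvBacc M md n t).2.2.length = t := by
  intro t
  induction t with
  | zero => exact ⟨rfl, rfl, rfl⟩
  | succ t ih =>
      rw [pvBacc_succ]
      simp only [List.length_append, List.length_cons, List.length_nil]
      omega

theorem pvStep_lengths (md : Int) (n : Nat) (Us : List (List Int)) (invs : List Int) :
    ∀ (l : List Nat) (rl : List Int × List Int), rl.1.length = n → rl.2.length = n →
      ((l.foldl (bStep md n Us invs) rl).1.length = n ∧
       (l.foldl (bStep md n Us invs) rl).2.length = n) := by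
  intro l
  induction l with
  | nil => intro rl h1 h2; exact ⟨h1, h2⟩
  | cons s ss ih =>
      intro rl h1 h2
      refine ih _ ?_ ?_
      · simp [bStep]
      · simp [bStep, h2]

theorem pvRed_len (M : List (List Int)) (md : Int) (n t r : Nat) :
    (pvRed M md n t r).1.length = n ∧ (pvRed M md n t r).2.length = n := by
  exact pvStep_lengths md n _ _ _ _ (by simp [pvRow0]) (by simp)

-- a step with the (t+1)-stage tables at index s < t equals the t-stage step
theorem pvStep_stable (M : List (List Int)) (md : Int) (n t : Nat) :
    ∀ (rl : List Int × List Int) (s : Nat), s < t →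
      bStep md n (pvBacc M md n (t + 1)).2.1 (pvBacc M md n (t + 1)).2.2 rl s =
      bStep md n (pvBacc M md n t).2.1 (pvBacc M md n t).2.2 rl s := by
  intro rl s hs
  have hU := (pvBacc_len M md n t).2.1
  have hI := (pvBacc_len M md n t).2.2
  rw [pvBacc_succ]
  simp only [bStep]
  rw [pvGetD_snoc_lt _ _ _ (by omega), pvGetD_snoc_lt _ _ _ (by omega)]

theorem pvRed_succ (M : List (List Int)) (md : Int) (n t r : Nat) :
    pvRed M md n (t + 1) r =
      bStep md n (pvBacc M md n (t + 1)).2.1 (pvBacc M md n (t + 1)).2.2 (pvRed M md n t r) t := by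
  show (List.range (t + 1)).foldl _ _ = _
  rw [List.range_succ, List.foldl_append]
  simp only [List.foldl_cons, List.foldl_nil]
  congr 1
  refine pvFoldlCongr _ _ _ _ ?_
  intro b a ha
  exact pvStep_stable M md n t b a (List.mem_range.mp ha)

-- the row-level k-loop: in-place updates over range' a m equal take ++ map
theorem pvRowFold (g : Nat → Int → Int) :
    ∀ (m a : Nat) (r : List Int), a + m = r.length →
      (List.range' a m).foldl (fun r k => r.set k (g k (r.getD k 0))) r =
        r.take a ++ (List.range' a m).map (fun k => g k (r.getD k 0)) := by
  intro m
  induction m with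
  | zero =>
      intro a r h
      simp [List.take_of_length_le (by omega : r.length ≤ a)]
  | succ m ih =>
      intro a r h
      have ha : a < r.length := by omega
      rw [List.range'_succ]
      simp only [List.foldl_cons, List.map_cons]
      set v := g a (r.getD a 0) with hv
      have hlen : (a + 1) + m = (r.set a v).length := by simp; omega
      rw [ih (a + 1) (r.set a v) hlen]
      have htake : (r.set a v).take (a + 1) = r.take a ++ [v] := by
        rw [List.take_set, List.take_add_one]
        have : r[a]? = some r[a] := List.getElem?_eq_getElem ha
        rw [this]
        simp only [Option.toList_some]
        rw [List.set_append]
        simp [List.length_take, Nat.min_eq_left (le_of_lt ha)]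
      rw [htake]
      have hmap : (List.range' (a + 1) m).map (fun k => g k ((r.set a v).getD k 0)) =
          (List.range' (a + 1) m).map (fun k => g k (r.getD k 0)) := by
        refine List.map_congr_left ?_
        intro k hk
        have : a ≠ k := by
          have := (List.mem_range'_1.mp hk).1; omega
        rw [pvGetD_set_ne this]
      rw [hmap, List.append_assoc]
      rfl

-- the matrix-level k-loop, fold on U.set j r, row t (≠ j) stays fixed
theorem pvKFold (md : Int) (t j : Nat) (hne : j ≠ t) (lji : Int) (U : List (List Int))
    (hj : j < U.length) :
    ∀ (ks : List Nat) (r : List Int),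
      ks.foldl (aInnerK md t j lji) (U.set j r) =
        U.set j (ks.foldl (fun r k => r.set k (PySem.Int.mod (r.getD k 0 - lji * (U.getD t []).getD k 0) md)) r) := by
  intro ks
  induction ks with
  | nil => intro r; rfl
  | cons k ks ih =>
      intro r
      simp only [List.foldl_cons]
      have h1 : (U.set j r).getD j [] = r := pvGetD_set_self' hj
      have h2 : (U.set j r).getD t [] = U.getD t [] := pvGetD_set_ne' hne
      show ks.foldl (aInnerK md t j lji)
        ((U.set j r).set j (((U.set j r).getD j []).set k
          (PySem.Int.mod (pvMget (U.set j r) j k - lji * pvMget (U.set j r) t k) md))) = _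
      rw [show ((U.set j r).set j (((U.set j r).getD j []).set k
            (PySem.Int.mod (pvMget (U.set j r) j k - lji * pvMget (U.set j r) t k) md))) =
          U.set j (r.set k (PySem.Int.mod (r.getD k 0 - lji * (U.getD t []).getD k 0) md)) by
        rw [List.set_set]
        simp only [pvMget, h1, h2]]
      exact ih _

theorem pvInnerU (md : Int) (n t j : Nat) (hne : j ≠ t) (lji : Int) (U : List (List Int))
    (hj : j < U.length) (hrow : (U.getD j []).length = n) :
    (List.range n).foldl (aInnerK md t j lji) U =
      U.set j ((List.range n).map (fun k =>
        PySem.Int.mod ((U.getD j []).getD k 0 - lji * (U.getD t []).getD k 0) md)) := by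
  conv_lhs => rw [← pvSet_getD_self hj]
  rw [pvKFold md t j hne lji U hj]
  congr 1
  rw [List.range_eq_range']
  rw [pvRowFold (fun k x => PySem.Int.mod (x - lji * (U.getD t []).getD k 0) md) n 0 _ (by omega)]
  simp

-- state of A during the inner j-loop of outer iteration t
def pvLmid (M : List (List Int)) (md : Int) (n t j : Nat) : List (List Int) :=
  (pvBacc M md n (t + 1)).1 ++
    (List.range' (t + 1) (j - (t + 1))).map (fun r => (pvRed M md n (t + 1) r).2) ++
    (List.range' j (n - j)).map (fun r => (pvRed M md n t r).2)

def pvUmid (M : List (List Int)) (md : Int) (n t j : Nat) : List (List Int) :=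
  (pvBacc M md n (t + 1)).2.1 ++
    (List.range' (t + 1) (j - (t + 1))).map (fun r => (pvRed M md n (t + 1) r).1) ++
    (List.range' j (n - j)).map (fun r => (pvRed M md n t r).1)

theorem pvTriple_getD {A B C : List (List Int)} {j : Nat}
    (hA : A.length + B.length = j) :
    (A ++ B ++ C).getD j [] = C.getD 0 [] := by
  rw [List.append_assoc]
  rw [List.getD_append_right A (B ++ C) [] j (by omega)]
  rw [List.getD_append_right B C [] (j - A.length) (by omega)]
  congr 1
  omega

theorem pvTriple_set {A B C : List (List Int)} {j : Nat} {v : List Int}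
    (hA : A.length + B.length = j) :
    (A ++ B ++ C).set j v = A ++ B ++ C.set 0 v := by
  rw [List.append_assoc, List.append_assoc]
  rw [List.set_append]
  rw [if_neg (show ¬ j < A.length by omega)]
  rw [List.set_append]
  rw [if_neg (show ¬ j - A.length < B.length by omega)]
  have h0 : j - A.length - B.length = 0 := by omega
  rw [h0]

theorem pvInnerJ_step (M : List (List Int)) (md : Int) (n t j : Nat)
    (ht : t + 1 ≤ j) (hj : j < n) :
    aInnerJ md n t (pvInvt M md n t) (pvLmid M md n t j, pvUmid M md n t j) j =
      (pvLmid M md n t (j + 1), pvUmid M md n t (j + 1)) := by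
  have hlenA : (pvBacc M md n (t + 1)).1.length = t + 1 := (pvBacc_len M md n (t + 1)).1
  have hlenAU : (pvBacc M md n (t + 1)).2.1.length = t + 1 := (pvBacc_len M md n (t + 1)).2.1
  have hBlen : ((List.range' (t + 1) (j - (t + 1))).map
      (fun r => (pvRed M md n (t + 1) r).2)).length = j - (t + 1) := by simp
  have hBlenU : ((List.range' (t + 1) (j - (t + 1))).map
      (fun r => (pvRed M md n (t + 1) r).1)).length = j - (t + 1) := by simp
  have hsplit : List.range' j (n - j) = j :: List.range' (j + 1) (n - (j + 1)) := by
    have : n - j = (n - (j + 1)) + 1 := by omega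
    rw [this, List.range'_succ]
  -- the working row j in both matrices
  have hrowL : (pvLmid M md n t j).getD j [] = (pvRed M md n t j).2 := by
    unfold pvLmid
    rw [pvTriple_getD (by omega), hsplit]
    simp
  have hrowU : (pvUmid M md n t j).getD j [] = (pvRed M md n t j).1 := by
    unfold pvUmid
    rw [pvTriple_getD (by omega), hsplit]
    simp
  -- pivot row t in U
  have hrowT : (pvUmid M md n t j).getD t [] = (pvRed M md n t t).1 := by
    unfold pvUmid
    rw [List.append_assoc]
    rw [List.getD_append ((pvBacc M md n (t + 1)).2.1) _ [] t (by omega)]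
    rw [pvBacc_succ]
    exact pvGetD_snoc_at _ _ _ ((pvBacc_len M md n t).2.1).symm
  -- the multiplier equals bStep's f with the (t+1)-stage tables
  have hinv : (pvBacc M md n (t + 1)).2.2.getD t 0 = pvInvt M md n t := by
    rw [pvBacc_succ]
    exact pvGetD_snoc_at _ _ _ ((pvBacc_len M md n t).2.2).symm
  set lji := PySem.Int.mod ((pvRed M md n t j).1.getD t 0 * pvInvt M md n t) md with hlji
  -- identify the step on row j
  have hUs : (pvBacc M md n (t + 1)).2.1.getD t [] = (pvRed M md n t t).1 := by
    rw [pvBacc_succ]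
    exact pvGetD_snoc_at _ _ _ ((pvBacc_len M md n t).2.1).symm
  have hstep : bStep md n (pvBacc M md n (t + 1)).2.1 (pvBacc M md n (t + 1)).2.2
      (pvRed M md n t j) t =
      ((List.range n).map (fun k => PySem.Int.mod ((pvRed M md n t j).1.getD k 0 -
          lji * (pvRed M md n t t).1.getD k 0) md),
       (pvRed M md n t j).2.set t lji) := by
    simp only [bStep]
    rw [hinv, hUs, ← hlji]
  have hred : pvRed M md n (t + 1) j =
      ((List.range n).map (fun k => PySem.Int.mod ((pvRed M md n t j).1.getD k 0 -
          lji * (pvRed M md n t t).1.getD k 0) md),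
       (pvRed M md n t j).2.set t lji) := by
    rw [pvRed_succ, hstep]
  -- range' recombination
  have hrange : List.range' (t + 1) ((j + 1) - (t + 1)) =
      List.range' (t + 1) (j - (t + 1)) ++ [j] := by
    have h1 : (j + 1) - (t + 1) = (j - (t + 1)) + 1 := by omega
    rw [h1, List.range'_concat]
    congr 2
    omega
  have hm : pvMget (pvUmid M md n t j) j t = (pvRed M md n t j).1.getD t 0 := by
    simp only [pvMget, hrowU]
  simp only [aInnerJ]
  rw [hm, ← hlji]
  refine Prod.ext ?_ ?_
  · -- L component
    show (pvLmid M md n t j).set j (((pvLmid M md n t j).getD j []).set t lji) =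
      pvLmid M md n t (j + 1)
    rw [hrowL]
    unfold pvLmid
    rw [pvTriple_set (by omega)]
    rw [hsplit]
    simp only [List.map_cons, List.set_cons_zero]
    rw [hrange, List.map_append]
    simp [hred]
  · -- U component
    show (List.range n).foldl (aInnerK md t j lji) (pvUmid M md n t j) = pvUmid M md n t (j + 1)
    have hjlen : j < (pvUmid M md n t j).length := by
      unfold pvUmid
      simp only [List.length_append, List.length_map, List.length_range']
      omega
    rw [pvInnerU md n t j (by omega) _ _ hjlen (by rw [hrowU]; exact (pvRed_len M md n t j).1)]
    rw [hrowU, hrowT]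
    unfold pvUmid
    rw [pvTriple_set (by omega)]
    rw [hsplit]
    simp only [List.map_cons, List.set_cons_zero]
    rw [hrange, List.map_append]
    simp [hred]

theorem pvInner_inv (M : List (List Int)) (md : Int) (n t : Nat) :
    ∀ (m j : Nat), t + 1 ≤ j → j + m = n →
      (List.range' j m).foldl (aInnerJ md n t (pvInvt M md n t))
          (pvLmid M md n t j, pvUmid M md n t j) =
        (pvLmid M md n t n, pvUmid M md n t n) := by
  intro m
  induction m with
  | zero => intro j h1 h2; subst h2; simp
  | succ m ih =>
      intro j h1 h2
      rw [List.range'_succ, List.foldl_cons]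
      rw [pvInnerJ_step M md n t j h1 (by omega)]
      exact ih (j + 1) (by omega) (by omega)

-- A's state after t outer iterations
def pvLfull (M : List (List Int)) (md : Int) (n t : Nat) : List (List Int) :=
  (pvBacc M md n t).1 ++ (List.range' t (n - t)).map (fun r => (pvRed M md n t r).2)

def pvUfull (M : List (List Int)) (md : Int) (n t : Nat) : List (List Int) :=
  (pvBacc M md n t).2.1 ++ (List.range' t (n - t)).map (fun r => (pvRed M md n t r).1)

theorem pvOuter_step (M : List (List Int)) (md : Int) (n t : Nat) (ht : t < n) :
    aOuter md n (pvLfull M md n t, pvUfull M md n t) t = (pvLfull M md n (t + 1), pvUfull M md n (t + 1)) := by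
  have hlenL : (pvBacc M md n t).1.length = t := (pvBacc_len M md n t).1
  have hlenU : (pvBacc M md n t).2.1.length = t := (pvBacc_len M md n t).2.1
  have hsplit : List.range' t (n - t) = t :: List.range' (t + 1) (n - (t + 1)) := by
    have : n - t = (n - (t + 1)) + 1 := by omega
    rw [this, List.range'_succ]
  have hrowL : (pvLfull M md n t).getD t [] = (pvRed M md n t t).2 := by
    unfold pvLfull
    rw [List.getD_append_right _ _ _ _ (by omega), hsplit]
    simp [hlenL]
  have hrowU : (pvUfull M md n t).getD t [] = (pvRed M md n t t).1 := by
    unfold pvUfull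
    rw [List.getD_append_right _ _ _ _ (by omega), hsplit]
    simp [hlenU]
  have hL1 : (pvLfull M md n t).set t (((pvLfull M md n t).getD t []).set t 1) =
      pvLmid M md n t (t + 1) := by
    rw [hrowL]
    unfold pvLfull pvLmid
    rw [List.set_append, if_neg (by omega), hsplit]
    have h0 : t - (pvBacc M md n t).1.length = 0 := by omega
    rw [h0]
    simp only [List.map_cons, List.set_cons_zero]
    rw [pvBacc_succ]
    simp only [Nat.sub_self, List.range'_zero, List.map_nil, List.append_nil]
    rw [List.append_assoc, List.singleton_append]
  have hU1 : pvUfull M md n t = pvUmid M md n t (t + 1) := by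
    unfold pvUfull pvUmid
    rw [hsplit]
    simp only [List.map_cons]
    rw [pvBacc_succ]
    simp only [Nat.sub_self, List.range'_zero, List.map_nil, List.append_nil]
    rw [List.append_assoc, List.singleton_append]
  have hinv : modinv (pvMget (pvUfull M md n t) t t) md = pvInvt M md n t := by
    simp only [pvMget, hrowU, pvInvt]
  show (List.range' (t + 1) (n - (t + 1))).foldl
      (aInnerJ md n t (modinv (pvMget (pvUfull M md n t) t t) md))
      ((pvLfull M md n t).set t (((pvLfull M md n t).getD t []).set t 1), pvUfull M md n t) = _
  rw [hinv, hL1, hU1]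
  rw [pvInner_inv M md n t (n - (t + 1)) (t + 1) (le_refl _) (by omega)]
  unfold pvLmid pvUmid pvLfull pvUfull
  simp only [Nat.sub_self, List.range'_zero, List.map_nil, List.append_nil]

theorem pvA_inv (M : List (List Int)) (md : Int) (n : Nat)
    (L0 U0 : List (List Int))
    (hL0 : L0 = (List.range' 0 n).map (fun r => (pvRed M md n 0 r).2))
    (hU0 : U0 = (List.range' 0 n).map (fun r => (pvRed M md n 0 r).1)) :
    ∀ t, t ≤ n → (List.range t).foldl (aOuter md n) (L0, U0) = (pvLfull M md n t, pvUfull M md n t) := by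
  intro t
  induction t with
  | zero =>
      intro _
      simp only [List.range_zero, List.foldl_nil]
      unfold pvLfull pvUfull pvBacc
      simp [hL0, hU0]
  | succ t ih =>
      intro h
      rw [List.range_succ, List.foldl_append, ih (by omega)]
      simp only [List.foldl_cons, List.foldl_nil]
      exact pvOuter_step M md n t (by omega)

theorem pvRed_zero (M : List (List Int)) (md : Int) (n r : Nat) :
    pvRed M md n 0 r = (pvRow0 M md n r, List.replicate n 0) := rfl

theorem FactorisationLUMod_eq (M : List (List Int)) (md : Int) :
    FactorisationLUMod M md = FactorisationLUMod_alt M md := by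
  unfold FactorisationLUMod FactorisationLUMod_alt
  set n := M.length with hn
  have hL0 : (List.range n).map (fun _ => (List.range n).map (fun _ => (0 : Int))) =
      (List.range' 0 n).map (fun r => (pvRed M md n 0 r).2) := by
    rw [← List.range_eq_range']
    refine List.map_congr_left ?_
    intro r _
    rw [pvRed_zero]
    simp [List.map_const']
  have hU0 : (List.range n).map (fun i => (List.range n).map (fun j => PySem.Int.mod (pvMget M i j) md)) =
      (List.range' 0 n).map (fun r => (pvRed M md n 0 r).1) := by
    rw [← List.range_eq_range']
    refine List.map_congr_left ?_
    intro r _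
    rw [pvRed_zero]
    rfl
  rw [pvA_inv M md n _ _ hL0 hU0 n (le_refl n)]
  unfold pvLfull pvUfull
  simp only [Nat.sub_self, List.range'_zero, List.map_nil, List.append_nil]
  rfl

-- ===== VERDICT (by name: the statement is the Claim_ definition above) =====
theorem FactorisationLUMod_spec : Claim_equal_FactorisationLUMod := by
  intro M mod _ _
  unfold Spec_FactorisationLUMod
  exact FactorisationLUMod_eq M mod
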